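-- pv_equiv track=rewrite | github.com/jakubbrodzinski/aoc2021 | day19/beacon-scanner.py | part2
-- ===== SOURCE A (Python) =====
-- def manhattan_distance(p1, p2):
--     x1, y1, z1 = p1
--     x2, y2, z2 = p2
--     return abs(x1 - x2) + abs(y1 - y2) + abs(z1 - z2)
--
-- def part2(offsets):
--     max = 0
--     for o1 in offsets:
--         for o2 in offsets:
--             if o1 != o2:
--                 distance = manhattan_distance(o1, o2)
--                 if distance > max:
--                     max = distance
--     return max
-- ===== SOURCE B (Python) =====
-- def part2(offsets):
--     if not offsets:
--         return 0
--     best = 0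
--     for sy in (1, -1):
--         for sz in (1, -1):
--             vals = [p[0] + sy * p[1] + sz * p[2] for p in offsets]
--             best = max(best, max(vals) - min(vals))
--     return best
-- ===== Notes on version B (the rewrite author's own statement) =====
-- stated objective: faster
-- what changed: Replaces the O(n^2) all-pairs Manhattan-distance scan by the classic O(n) trick: for each of the 4 sign patterns (+1,± 1,± 1) take max minus min of the signed coordinate sum p[0]+sy*p[1]+sz*p[2]; the answer is the largest such spread.
-- outside the precondition, e.g. on part2([(1, 2)]): A returns 0, B raises IndexError
import Mathlib
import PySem

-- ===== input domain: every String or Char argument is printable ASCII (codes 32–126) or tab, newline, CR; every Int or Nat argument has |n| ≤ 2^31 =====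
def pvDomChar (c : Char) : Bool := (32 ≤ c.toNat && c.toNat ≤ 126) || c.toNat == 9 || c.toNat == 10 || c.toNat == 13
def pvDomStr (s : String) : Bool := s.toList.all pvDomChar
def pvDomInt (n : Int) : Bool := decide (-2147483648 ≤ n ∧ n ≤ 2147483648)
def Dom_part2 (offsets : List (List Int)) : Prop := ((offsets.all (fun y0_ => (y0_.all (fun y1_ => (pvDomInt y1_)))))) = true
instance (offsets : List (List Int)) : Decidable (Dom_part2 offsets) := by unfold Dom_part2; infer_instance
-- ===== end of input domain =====

-- B replaces A's O(n^2) all-pairs Manhattan scan by an O(n) pass tracking, for each of the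
-- 4 sign patterns, the max-min spread of the signed coordinate sums (objective: faster).


-- ===== PORT A =====
-- coordinates read with getD: exact under Pre_part2 (every point has exactly 3
-- coordinates; Python's unpacking 'x1, y1, z1 = p1' raises otherwise)
def manhattan_distance (p1 p2 : List Int) : Int :=
  |p1.getD 0 0 - p2.getD 0 0| + |p1.getD 1 0 - p2.getD 1 0| + |p1.getD 2 0 - p2.getD 2 0|

def part2 (offsets : List (List Int)) : Int :=
  offsets.foldl (fun m o1 =>
    offsets.foldl (fun m o2 =>
      if o1 ≠ o2 then
        (if manhattan_distance o1 o2 > m then manhattan_distance o1 o2 else m)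
      else m) m) 0

-- ===== PORT B =====
-- the signed coordinate sum p[0] + sy*p[1] + sz*p[2] of a point
-- (getD is exact under Pre_part2: every point indexed has at least 3 coordinates)
def gval (sy sz : Int) (o : List Int) : Int :=
  o.getD 0 0 + sy * o.getD 1 0 + sz * o.getD 2 0

-- body of B's inner loop: max(vals) - min(vals) of the signed sums ([] unreachable: offsets ≠ [])
def spreadOf (sy sz : Int) (offsets : List (List Int)) : Int :=
  match offsets.map (gval sy sz) with
  | [] => 0
  | v :: vs => (vs.foldl max v) - (vs.foldl min v)

def part2_alt (offsets : List (List Int)) : Int :=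
  if offsets = [] then 0
  else
    [(1 : Int), -1].foldl (fun best sy =>
      [(1 : Int), -1].foldl (fun best sz =>
        max best (spreadOf sy sz offsets)) best) 0

-- ===== PRECONDITION & SPEC =====
-- Pre_ admits exactly the inputs where both programs return: A raises ValueError at unpacking
-- whenever a point lacks exactly 3 coordinates and two distinct points exist (with all points
-- equal the '!=' guard fires before any unpacking, so A returns 0); B indexes p[0..2] and so
-- raises IndexError on points shorter than 3. Pre_ excludes the remaining corner — all points
-- equal but shorter than 3 — where A returns 0 and B raises IndexError.
def Pre_part2 (offsets : List (List Int)) : Prop :=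
  (∀ o ∈ offsets, o.length = 3) ∨
  ((∀ o ∈ offsets, ∀ o' ∈ offsets, o = o') ∧ ∀ o ∈ offsets, 3 ≤ o.length)

instance (offsets : List (List Int)) : Decidable (Pre_part2 offsets) := by
  unfold Pre_part2; infer_instance

def pvWitness_part2 : List (List Int) := [[1, 2, 3], [4, 6, 8]]

def Spec_part2 (offsets : List (List Int)) (out : Int) : Prop := out = part2_alt offsets
instance (offsets : List (List Int)) (out : Int) : Decidable (Spec_part2 offsets out) := by unfold Spec_part2; infer_instance

-- ===== CLAIM (what is proved, stated in full; the proofs are below) =====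
def Claim_equal_part2 : Prop := ∀ (offsets : List (List Int)), Dom_part2 offsets → Pre_part2 offsets → Spec_part2 offsets (part2 offsets)

-- ===== LEMMAS AND PROOFS =====

-- generic facts about foldl max / foldl min over Int
theorem le_foldl_max_init (l : List Int) (a : Int) : a ≤ l.foldl max a := by
  induction l generalizing a with
  | nil => simp
  | cons x xs ih => exact le_trans (le_max_left a x) (ih _)

theorem le_foldl_max_mem (l : List Int) (a x : Int) (h : x ∈ l) : x ≤ l.foldl max a := by
  induction l generalizing a with
  | nil => simp at h
  | cons y ys ih =>
    rcases List.mem_cons.mp h with rfl | h'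
    · exact le_trans (le_max_right a x) (le_foldl_max_init _ _)
    · exact ih _ h'

theorem foldl_max_cases (l : List Int) (a : Int) :
    l.foldl max a = a ∨ ∃ x ∈ l, l.foldl max a = x := by
  induction l generalizing a with
  | nil => exact Or.inl rfl
  | cons x xs ih =>
    rcases ih (max a x) with h | ⟨y, hy, hy'⟩
    · rcases max_choice a x with h' | h'
      · exact Or.inl (by simpa [h'] using h)
      · exact Or.inr ⟨x, List.mem_cons_self, by simpa [h'] using h⟩
    · exact Or.inr ⟨y, List.mem_cons_of_mem _ hy, hy'⟩

theorem foldl_min_init_le (l : List Int) (a : Int) : l.foldl min a ≤ a := by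
  induction l generalizing a with
  | nil => simp
  | cons x xs ih => exact le_trans (ih _) (min_le_left a x)

theorem foldl_min_le_mem (l : List Int) (a x : Int) (h : x ∈ l) : l.foldl min a ≤ x := by
  induction l generalizing a with
  | nil => simp at h
  | cons y ys ih =>
    rcases List.mem_cons.mp h with rfl | h'
    · exact le_trans (foldl_min_init_le ys (min a x)) (min_le_right a x)
    · exact ih _ h'

theorem foldl_min_cases (l : List Int) (a : Int) :
    l.foldl min a = a ∨ ∃ x ∈ l, l.foldl min a = x := by
  induction l generalizing a with
  | nil => exact Or.inl rfl
  | cons x xs ih =>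
    rcases ih (min a x) with h | ⟨y, hy, hy'⟩
    · rcases min_choice a x with h' | h'
      · exact Or.inl (by simpa [h'] using h)
      · exact Or.inr ⟨x, List.mem_cons_self, by simpa [h'] using h⟩
    · exact Or.inr ⟨y, List.mem_cons_of_mem _ hy, hy'⟩

-- |a|+|b|+|c| bounded by a bound on all 8 signed sums
theorem abs3_le (a b c B : Int)
    (h11 : a + b + c ≤ B ∧ -a - b - c ≤ B)
    (h1m : a + b - c ≤ B ∧ -a - b + c ≤ B)
    (hm1 : a - b + c ≤ B ∧ -a + b - c ≤ B)
    (hmm : a - b - c ≤ B ∧ -a + b + c ≤ B) :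
    |a| + |b| + |c| ≤ B := by
  obtain ⟨h1, h2⟩ := h11; obtain ⟨h3, h4⟩ := h1m
  obtain ⟨h5, h6⟩ := hm1; obtain ⟨h7, h8⟩ := hmm
  rcases abs_cases a with ⟨ea, _⟩ | ⟨ea, _⟩ <;>
    rcases abs_cases b with ⟨eb, _⟩ | ⟨eb, _⟩ <;>
      rcases abs_cases c with ⟨ec, _⟩ | ⟨ec, _⟩ <;>
        rw [ea, eb, ec] <;> omega

-- any signed sum is at most |a|+|b|+|c|
theorem signed_le_abs3 (a b c sy sz : Int) (hy : sy = 1 ∨ sy = -1) (hz : sz = 1 ∨ sz = -1) :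
    a + sy * b + sz * c ≤ |a| + |b| + |c| := by
  rcases abs_cases a with ⟨ea, _⟩ | ⟨ea, _⟩ <;>
    rcases abs_cases b with ⟨eb, _⟩ | ⟨eb, _⟩ <;>
      rcases abs_cases c with ⟨ec, _⟩ | ⟨ec, _⟩ <;>
        rw [ea, eb, ec] <;> rcases hy with rfl | rfl <;> rcases hz with rfl | rfl <;> omega

theorem md_self (p : List Int) : manhattan_distance p p = 0 := by
  simp [manhattan_distance]

-- A's inner loop is a fold of max over the distances from o1
theorem inner_eq (o1 : List Int) (L : List (List Int)) (acc : Int) (h : 0 ≤ acc) :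
    L.foldl (fun m o2 =>
      if o1 ≠ o2 then
        (if manhattan_distance o1 o2 > m then manhattan_distance o1 o2 else m)
      else m) acc
    = (L.map (manhattan_distance o1)).foldl max acc := by
  induction L generalizing acc with
  | nil => rfl
  | cons x xs ih =>
    have hstep : (if o1 ≠ x then
        (if manhattan_distance o1 x > acc then manhattan_distance o1 x else acc)
      else acc) = max acc (manhattan_distance o1 x) := by
      by_cases hx : o1 = x
      · subst hx; simp [md_self]; omega
      · simp only [hx, ne_eq, not_false_iff, if_true]
        rcases max_choice acc (manhattan_distance o1 x) with h' | h' <;> rw [h'] <;> omega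
    simp only [List.foldl_cons, List.map_cons, hstep]
    exact ih _ (le_trans h (le_max_left _ _))

def dists (L : List (List Int)) : List Int :=
  L.flatMap (fun o1 => L.map (manhattan_distance o1))

theorem outer_eq (L K : List (List Int)) (acc : Int) (h : 0 ≤ acc) :
    K.foldl (fun m o1 =>
      L.foldl (fun m o2 =>
        if o1 ≠ o2 then
          (if manhattan_distance o1 o2 > m then manhattan_distance o1 o2 else m)
        else m) m) acc
    = (K.flatMap (fun o1 => L.map (manhattan_distance o1))).foldl max acc := by
  induction K generalizing acc with
  | nil => rfl
  | cons x xs ih =>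
    simp only [List.foldl_cons, List.flatMap_cons, List.foldl_append]
    rw [inner_eq _ _ _ h]
    exact ih _ (le_trans h (le_foldl_max_init _ _))

theorem part2_eq (L : List (List Int)) : part2 L = (dists L).foldl max 0 := by
  unfold part2 dists
  exact outer_eq L L 0 le_rfl

theorem part2_nonneg (L : List (List Int)) : 0 ≤ part2 L := by
  rw [part2_eq]; exact le_foldl_max_init _ _

theorem md_le_part2 (L : List (List Int)) (p q : List Int) (hp : p ∈ L) (hq : q ∈ L) :
    manhattan_distance p q ≤ part2 L := by
  rw [part2_eq]
  apply le_foldl_max_mem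
  simp only [dists, List.mem_flatMap, List.mem_map]
  exact ⟨p, hp, q, hq, rfl⟩

theorem part2_cases (L : List (List Int)) :
    part2 L = 0 ∨ ∃ p ∈ L, ∃ q ∈ L, part2 L = manhattan_distance p q := by
  rw [part2_eq]
  rcases foldl_max_cases (dists L) 0 with h | ⟨x, hx, hx'⟩
  · exact Or.inl h
  · simp only [dists, List.mem_flatMap, List.mem_map] at hx
    obtain ⟨p, hp, q, hq, rfl⟩ := hx
    exact Or.inr ⟨p, hp, q, hq, hx'⟩

-- B-side facts
theorem spread_ge (sy sz : Int) (L : List (List Int)) (p q : List Int)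
    (hp : p ∈ L) (hq : q ∈ L) :
    gval sy sz p - gval sy sz q ≤ spreadOf sy sz L := by
  unfold spreadOf
  cases L with
  | nil => simp at hp
  | cons o os =>
    simp only [List.map_cons]
    have hmax : gval sy sz p ≤ (os.map (gval sy sz)).foldl max (gval sy sz o) := by
      rcases List.mem_cons.mp hp with rfl | h'
      · exact le_foldl_max_init _ _
      · exact le_foldl_max_mem _ _ _ (List.mem_map_of_mem h')
    have hmin : (os.map (gval sy sz)).foldl min (gval sy sz o) ≤ gval sy sz q := by
      rcases List.mem_cons.mp hq with rfl | h'
      · exact foldl_min_init_le _ _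
      · exact foldl_min_le_mem _ _ _ (List.mem_map_of_mem h')
    omega

theorem spread_witness (sy sz : Int) (L : List (List Int)) (h : L ≠ []) :
    ∃ p ∈ L, ∃ q ∈ L, spreadOf sy sz L = gval sy sz p - gval sy sz q := by
  unfold spreadOf
  cases L with
  | nil => exact absurd rfl h
  | cons o os =>
    simp only [List.map_cons]
    have hmax : ∃ p ∈ o :: os, (os.map (gval sy sz)).foldl max (gval sy sz o) = gval sy sz p := by
      rcases foldl_max_cases (os.map (gval sy sz)) (gval sy sz o) with h' | ⟨x, hx, hx'⟩
      · exact ⟨o, List.mem_cons_self, h'⟩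
      · obtain ⟨p, hp, rfl⟩ := List.mem_map.mp hx
        exact ⟨p, List.mem_cons_of_mem _ hp, hx'⟩
    have hmin : ∃ q ∈ o :: os, (os.map (gval sy sz)).foldl min (gval sy sz o) = gval sy sz q := by
      rcases foldl_min_cases (os.map (gval sy sz)) (gval sy sz o) with h' | ⟨x, hx, hx'⟩
      · exact ⟨o, List.mem_cons_self, h'⟩
      · obtain ⟨q, hq, rfl⟩ := List.mem_map.mp hx
        exact ⟨q, List.mem_cons_of_mem _ hq, hx'⟩
    obtain ⟨p, hp, ep⟩ := hmax
    obtain ⟨q, hq, eq'⟩ := hmin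
    exact ⟨p, hp, q, hq, by rw [ep, eq']⟩

theorem alt_eq (L : List (List Int)) (h : L ≠ []) :
    part2_alt L = max (max (max (max 0 (spreadOf 1 1 L)) (spreadOf 1 (-1) L))
      (spreadOf (-1) 1 L)) (spreadOf (-1) (-1) L) := by
  simp [part2_alt, h, List.foldl]

theorem alt_nonneg (L : List (List Int)) : 0 ≤ part2_alt L := by
  by_cases h : L = []
  · simp [part2_alt, h]
  · rw [alt_eq L h]
    exact le_trans (le_max_left _ _)
      (le_trans (le_max_left _ _) (le_trans (le_max_left _ _) (le_max_left _ _)))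

theorem spread_le_alt (sy sz : Int) (L : List (List Int)) (h : L ≠ [])
    (hy : sy = 1 ∨ sy = -1) (hz : sz = 1 ∨ sz = -1) :
    spreadOf sy sz L ≤ part2_alt L := by
  rw [alt_eq L h]
  rcases hy with rfl | rfl <;> rcases hz with rfl | rfl
  · exact le_trans (le_max_right _ _)
      (le_trans (le_max_left _ _) (le_trans (le_max_left _ _) (le_max_left _ _)))
  · exact le_trans (le_max_right _ _) (le_trans (le_max_left _ _) (le_max_left _ _))
  · exact le_trans (le_max_right _ _) (le_max_left _ _)
  · exact le_max_right _ _

theorem alt_cases (L : List (List Int)) (h : L ≠ []) :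
    part2_alt L = 0 ∨ ∃ sy sz : Int, (sy = 1 ∨ sy = -1) ∧ (sz = 1 ∨ sz = -1) ∧
      part2_alt L = spreadOf sy sz L := by
  rw [alt_eq L h]
  rcases max_choice (max (max (max 0 (spreadOf 1 1 L)) (spreadOf 1 (-1) L)) (spreadOf (-1) 1 L))
      (spreadOf (-1) (-1) L) with h4 | h4
  · rw [h4]
    rcases max_choice (max (max 0 (spreadOf 1 1 L)) (spreadOf 1 (-1) L)) (spreadOf (-1) 1 L)
        with h3 | h3
    · rw [h3]
      rcases max_choice (max 0 (spreadOf 1 1 L)) (spreadOf 1 (-1) L) with h2 | h2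
      · rw [h2]
        rcases max_choice 0 (spreadOf 1 1 L) with h1 | h1
        · exact Or.inl h1
        · exact Or.inr ⟨1, 1, Or.inl rfl, Or.inl rfl, h1⟩
      · exact Or.inr ⟨1, -1, Or.inl rfl, Or.inr rfl, h2⟩
    · exact Or.inr ⟨-1, 1, Or.inr rfl, Or.inl rfl, h3⟩
  · exact Or.inr ⟨-1, -1, Or.inr rfl, Or.inr rfl, h4⟩

-- the two signed-sum differences of a pattern, rewritten as signed sums of coordinate gaps
theorem gval_sub (sy sz : Int) (p q : List Int) :
    gval sy sz p - gval sy sz q =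
      (p.getD 0 0 - q.getD 0 0) + sy * (p.getD 1 0 - q.getD 1 0) + sz * (p.getD 2 0 - q.getD 2 0) := by
  simp [gval]; ring

theorem md_le_alt (L : List (List Int)) (h : L ≠ []) (p q : List Int)
    (hp : p ∈ L) (hq : q ∈ L) :
    manhattan_distance p q ≤ part2_alt L := by
  have key : ∀ sy sz : Int, (sy = 1 ∨ sy = -1) → (sz = 1 ∨ sz = -1) →
      gval sy sz p - gval sy sz q ≤ part2_alt L ∧
      gval sy sz q - gval sy sz p ≤ part2_alt L := by
    intro sy sz hy hz
    exact ⟨le_trans (spread_ge sy sz L p q hp hq) (spread_le_alt sy sz L h hy hz),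
      le_trans (spread_ge sy sz L q p hq hp) (spread_le_alt sy sz L h hy hz)⟩
  have h11 := key 1 1 (Or.inl rfl) (Or.inl rfl)
  have h1m := key 1 (-1) (Or.inl rfl) (Or.inr rfl)
  have hm1 := key (-1) 1 (Or.inr rfl) (Or.inl rfl)
  have hmm := key (-1) (-1) (Or.inr rfl) (Or.inr rfl)
  rw [gval_sub, gval_sub] at h11 h1m hm1 hmm
  unfold manhattan_distance
  apply abs3_le <;> constructor <;> omega

theorem part2_le_alt (L : List (List Int)) : part2 L ≤ part2_alt L := by
  by_cases h : L = []
  · subst h; simp [part2, part2_alt]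
  · rcases part2_cases L with h0 | ⟨p, hp, q, hq, he⟩
    · rw [h0]; exact alt_nonneg L
    · rw [he]; exact md_le_alt L h p q hp hq

theorem alt_le_part2 (L : List (List Int)) : part2_alt L ≤ part2 L := by
  by_cases h : L = []
  · subst h; simp [part2, part2_alt]
  · rcases alt_cases L h with h0 | ⟨sy, sz, hy, hz, he⟩
    · rw [h0]; exact part2_nonneg L
    · rw [he]
      obtain ⟨p, hp, q, hq, hs⟩ := spread_witness sy sz L h
      rw [hs, gval_sub]
      refine le_trans ?_ (md_le_part2 L p q hp hq)
      exact signed_le_abs3 _ _ _ _ _ hy hz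

-- ===== VERDICT (by name: the statement is the Claim_ definition above) =====
theorem part2_spec : Claim_equal_part2 := by
  intro offsets _ _
  unfold Spec_part2
  exact le_antisymm (part2_le_alt offsets) (alt_le_part2 offsets)
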